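-- pv_equiv track=rewrite | github.com/Ramlah7/Mental-Health-Chatbot-AI | scripts/data/adddata.py | parse_faq_generic
-- ===== SOURCE A (Python) =====
-- def safe_strip(text):
--     if text is None:
--         return ""
--     if not isinstance(text, str):
--         try:
--             text = str(text)
--         except:
--             return ""
--     return text.strip()
--
-- def parse_faq_generic(example):
--     # unchanged generic FAQ parser
--     for q_field in ["Questions", "question", "questionText", "Question"]:
--         for a_field in ["Answers", "answer", "answerText", "Answer"]:
--             if q_field in example and a_field in example:
--                 return safe_strip(example.get(q_field)), safe_strip(example.get(a_field))
--     if "text" in example: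
--         return safe_strip(example.get("text")), ""
--     all_vals = [safe_strip(v) for v in example.values() if v is not None]
--     return " | ".join(all_vals), ""
-- ===== SOURCE B (Python) =====
-- def safe_strip(text):
--     if text is None:
--         return ""
--     if not isinstance(text, str):
--         try:
--             text = str(text)
--         except:
--             return ""
--     return text.strip()
--
-- Q_FIELDS = ["Questions", "question", "questionText", "Question"]
-- A_FIELDS = ["Answers", "answer", "answerText", "Answer"]
-- QPRI = {"Questions": 0, "question": 1, "questionText": 2, "Question": 3}
-- APRI = {"Answers": 0, "answer": 1, "answerText": 2, "Answer": 3}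
--
-- def parse_faq_generic(example):
--     # One pass over the mapping itself: rank every key by its priority in the
--     # question/answer field tables and keep the best (lowest) rank seen.
--     qi = ai = 4
--     for k in example:
--         qi = min(qi, QPRI.get(k, 4))
--         ai = min(ai, APRI.get(k, 4))
--     if qi < 4 and ai < 4:
--         return safe_strip(example[Q_FIELDS[qi]]), safe_strip(example[A_FIELDS[ai]])
--     if "text" in example:
--         return safe_strip(example.get("text")), ""
--     all_vals = [safe_strip(v) for v in example.values() if v is not None]
--     return " | ".join(all_vals), ""
-- ===== Notes on version B (the rewrite author's own statement) =====
-- stated objective: alternative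
-- what changed: Instead of probing the dict with nested loops over the fixed question/answer field lists, B makes a single pass over the mapping's own keys, ranking each key by a priority table and keeping the minimum rank per category, then indexes the field lists by the winning ranks.
import Mathlib
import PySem

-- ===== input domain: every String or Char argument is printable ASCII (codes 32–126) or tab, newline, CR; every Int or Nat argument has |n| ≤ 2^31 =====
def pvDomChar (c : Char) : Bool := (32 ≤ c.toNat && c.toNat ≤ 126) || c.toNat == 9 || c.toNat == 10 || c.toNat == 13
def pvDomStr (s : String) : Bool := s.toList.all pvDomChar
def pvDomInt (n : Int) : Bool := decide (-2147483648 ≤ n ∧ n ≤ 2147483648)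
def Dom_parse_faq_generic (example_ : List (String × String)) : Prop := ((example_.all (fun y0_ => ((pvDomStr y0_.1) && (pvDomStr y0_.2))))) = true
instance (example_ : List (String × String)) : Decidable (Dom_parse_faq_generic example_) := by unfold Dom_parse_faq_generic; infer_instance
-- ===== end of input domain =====

-- B replaces A's nested key-probing loops by a single pass over the mapping's own
-- keys keeping the minimum priority rank per category; objective: alternative.


-- ===== PORT A =====
-- safe_strip(example.get(k)): get returns Optional[str]; safe_strip(None) = "".
def pvSafeStrip (t : Option String) : String :=
  match t with
  | none => ""
  | some s => PySem.Str.strip s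

-- inner 'for a_field in [...]' loop
def pvLoopA (q : String) (afields : List String) (d : PySem.Dict String String) :
    Option (String × String) :=
  match afields with
  | [] => none
  | a :: rest =>
      if d.contains q && d.contains a then
        some (pvSafeStrip (d.get? q), pvSafeStrip (d.get? a))
      else pvLoopA q rest d

-- outer 'for q_field in [...]' loop
def pvLoopQ (qfields : List String) (d : PySem.Dict String String) :
    Option (String × String) :=
  match qfields with
  | [] => none
  | q :: rest =>
      match pvLoopA q ["Answers", "answer", "answerText", "Answer"] d with
      | some r => some r
      | none => pvLoopQ rest d

def parse_faq_generic (example_ : List (String × String)) : String × String :=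
  let d : PySem.Dict String String := PySem.Dict.mk example_
  match pvLoopQ ["Questions", "question", "questionText", "Question"] d with
  | some r => r
  | none =>
      if d.contains "text" then (pvSafeStrip (d.get? "text"), "")
      else (PySem.Str.join " | " (d.values.map (fun v => PySem.Str.strip v)), "")

-- ===== PORT B =====
def pvQFields : List String := ["Questions", "question", "questionText", "Question"]
def pvAFields : List String := ["Answers", "answer", "answerText", "Answer"]
def pvQPRI : PySem.Dict String Nat :=
  PySem.Dict.mk [("Questions", 0), ("question", 1), ("questionText", 2), ("Question", 3)]
def pvAPRI : PySem.Dict String Nat :=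
  PySem.Dict.mk [("Answers", 0), ("answer", 1), ("answerText", 2), ("Answer", 3)]

def parse_faq_generic_alt (example_ : List (String × String)) : String × String :=
  let d : PySem.Dict String String := PySem.Dict.mk example_
  -- 'for k in example: qi = min(qi, QPRI.get(k, 4)); ai = min(ai, APRI.get(k, 4))'
  let st := d.keys.foldl
      (fun (s : Nat × Nat) k => (min s.1 (pvQPRI.getD k 4), min s.2 (pvAPRI.getD k 4))) (4, 4)
  if st.1 < 4 && st.2 < 4 then
    (pvSafeStrip (d.get? (PySem.List.pyGetD pvQFields (st.1 : Int) "")),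
     pvSafeStrip (d.get? (PySem.List.pyGetD pvAFields (st.2 : Int) "")))
  else if d.contains "text" then (pvSafeStrip (d.get? "text"), "")
  else (PySem.Str.join " | " (d.values.map (fun v => PySem.Str.strip v)), "")

-- ===== PRECONDITION & SPEC =====
def Spec_parse_faq_generic (example_ : List (String × String)) (out : String × String) : Prop := out = parse_faq_generic_alt example_
instance (example_ : List (String × String)) (out : String × String) : Decidable (Spec_parse_faq_generic example_ out) := by unfold Spec_parse_faq_generic; infer_instance

-- ===== CLAIM (what is proved, stated in full; the proofs are below) =====
def Claim_equal_parse_faq_generic : Prop := ∀ (example_ : List (String × String)), Dom_parse_faq_generic example_ → Spec_parse_faq_generic example_ (parse_faq_generic example_)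

-- ===== LEMMAS AND PROOFS =====

-- B's fold over a pair with independent components splits into two folds
theorem pv_foldl_pair :
    ∀ (l : List String) (a b : Nat),
      l.foldl (fun (s : Nat × Nat) k =>
          (min s.1 (pvQPRI.getD k 4), min s.2 (pvAPRI.getD k 4))) (a, b) =
        (l.foldl (fun m k => min m (pvQPRI.getD k 4)) a,
         l.foldl (fun m k => min m (pvAPRI.getD k 4)) b) := by
  intro l
  induction l with
  | nil => intro a b; rfl
  | cons k t ih => intro a b; simpa [List.foldl_cons] using ih _ _

-- the running minimum of a 4-valued priority function equals the rank of the
-- first of the four keys that occurs in the scanned list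
theorem pv_foldl_min (k0 k1 k2 k3 : String) (pri : String → Nat)
    (hpri : ∀ k, pri k = if k0 == k then 0 else if k1 == k then 1 else
        if k2 == k then 2 else if k3 == k then 3 else 4) :
    ∀ (seen : List String) (m : Nat), m ≤ 4 →
      seen.foldl (fun m k => min m (pri k)) m =
        min m (if k0 ∈ seen then 0 else if k1 ∈ seen then 1 else
          if k2 ∈ seen then 2 else if k3 ∈ seen then 3 else 4) := by
  intro seen
  induction seen with
  | nil => intro m hm; simp; omega
  | cons k t ih =>
      intro m hm
      have hk : pri k ≤ 4 := by rw [hpri]; split_ifs <;> omega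
      rw [List.foldl_cons, ih (min m (pri k)) (by omega)]
      rw [hpri]
      by_cases h0 : k0 = k <;> by_cases h1 : k1 = k <;> by_cases h2 : k2 = k <;>
        by_cases h3 : k3 = k <;>
        simp [h0, h1, h2, h3, List.mem_cons] <;> split_ifs <;> omega

-- evaluating the literal priority dicts
theorem pv_qpri (k : String) : pvQPRI.getD k 4 =
    if "Questions" == k then 0 else if "question" == k then 1 else
      if "questionText" == k then 2 else if "Question" == k then 3 else 4 := by
  simp only [pvQPRI, PySem.Dict.getD_eq_get?_getD, PySem.Dict.get?_mk_cons]
  split_ifs <;> rfl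

theorem pv_apri (k : String) : pvAPRI.getD k 4 =
    if "Answers" == k then 0 else if "answer" == k then 1 else
      if "answerText" == k then 2 else if "Answer" == k then 3 else 4 := by
  simp only [pvAPRI, PySem.Dict.getD_eq_get?_getD, PySem.Dict.get?_mk_cons]
  split_ifs <;> rfl

-- both programs, as functions of an arbitrary dict, agree
set_option maxHeartbeats 4000000 in
theorem pv_main (d : PySem.Dict String String) :
    (match pvLoopQ ["Questions", "question", "questionText", "Question"] d with
     | some r => r
     | none =>
         if d.contains "text" then (pvSafeStrip (d.get? "text"), "")
         else (PySem.Str.join " | " (d.values.map (fun v => PySem.Str.strip v)), "")) =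
    (let st := d.keys.foldl
        (fun (s : Nat × Nat) k => (min s.1 (pvQPRI.getD k 4), min s.2 (pvAPRI.getD k 4))) (4, 4)
     if st.1 < 4 && st.2 < 4 then
       (pvSafeStrip (d.get? (PySem.List.pyGetD pvQFields (st.1 : Int) "")),
        pvSafeStrip (d.get? (PySem.List.pyGetD pvAFields (st.2 : Int) "")))
     else if d.contains "text" then (pvSafeStrip (d.get? "text"), "")
     else (PySem.Str.join " | " (d.values.map (fun v => PySem.Str.strip v)), "")) := by
  simp only [pv_foldl_pair,
    pv_foldl_min "Questions" "question" "questionText" "Question" _ pv_qpri d.keys 4 (by omega),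
    pv_foldl_min "Answers" "answer" "answerText" "Answer" _ pv_apri d.keys 4 (by omega)]
  by_cases h1 : "Questions" ∈ d.keys <;> by_cases h2 : "question" ∈ d.keys <;>
    by_cases h3 : "questionText" ∈ d.keys <;> by_cases h4 : "Question" ∈ d.keys <;>
    by_cases h5 : "Answers" ∈ d.keys <;> by_cases h6 : "answer" ∈ d.keys <;>
    by_cases h7 : "answerText" ∈ d.keys <;> by_cases h8 : "Answer" ∈ d.keys <;>
    simp [pvLoopQ, pvLoopA, PySem.Dict.contains_eq_decide_mem_keys,
      h1, h2, h3, h4, h5, h6, h7, h8, pvQFields, pvAFields, PySem.List.pyGetD]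

-- ===== VERDICT (by name: the statement is the Claim_ definition above) =====
theorem parse_faq_generic_spec : Claim_equal_parse_faq_generic := by
  intro example_ _
  unfold Spec_parse_faq_generic parse_faq_generic parse_faq_generic_alt
  exact pv_main (PySem.Dict.mk example_)
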